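-- pv_equiv track=rewrite | github.com/xNitix/ASD_AGH_2023 | graph tasks/grafy3/wyscigi.py | wyscig
-- ===== SOURCE A (Python) =====
-- def wyscig(G):
--     n = len(G)
--     visited = [False for _ in range(n)]
--     order = []
--
--     def DFSVisit(G,s,visited,order : list ):
--         visited[s] = True
--         for v in G[s]:
--             if not visited[v]:
--                 DFSVisit(G,v,visited,order)
--         order.append(s)
--
--     for i in range(n):
--         if not visited[i]:
--             DFSVisit(G,i,visited,order)
--
--     def Flip_Edge(G):
--         n = len(G)
--         G_C = [[] for _ in range(n)]
--         for i in range(n):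
--             for v in G[i]:
--                 G_C[v].append(i)
--         return G_C
--
--     G2 = Flip_Edge(G)
--
--     order.reverse()
--
--     visited = [False for _ in range(n)]
--     res = []
--
--     for i in order:
--         components = []
--         if not visited[i]:
--             DFSVisit(G2,i,visited,components)
--             res.append(components)
--
--     for i in res:
--         if len(i) == 1:
--             return False
--
--     return True
-- ===== SOURCE B (Python) =====
-- def _postorder(adj, r, visited, out):
--     visited[r] = True
--     stack = [(r, adj[r])]
--     while stack:
--         s, ns = stack.pop()
--         if not ns:
--             out.append(s)
--             continue
--         v = ns[0]
--         stack.append((s, ns[1:]))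
--         if not visited[v]:
--             visited[v] = True
--             stack.append((v, adj[v]))
--
--
-- def wyscig(G):
--     n = len(G)
--     visited = [False] * n
--     order = []
--     for r in range(n):
--         if not visited[r]:
--             _postorder(G, r, visited, order)
--     GT = [[] for _ in range(n)]
--     for i in range(n):
--         for v in G[i]:
--             GT[v].append(i)
--     visited = [False] * n
--     for r in reversed(order):
--         if not visited[r]:
--             comp = []
--             _postorder(GT, r, visited, comp)
--             if len(comp) == 1:
--                 return False
--     return True
-- ===== Notes on version B (the rewrite author's own statement) =====
-- stated objective: alternative
-- what changed: Same Kosaraju two-pass SCC strategy, but recursion is replaced by one shared explicit-stack postorder machine used for both passes, and the second pass short-circuits on the first singleton component instead of collecting all components and scanning them afterwards (also immune to Python's recursion limit).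
import Mathlib
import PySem

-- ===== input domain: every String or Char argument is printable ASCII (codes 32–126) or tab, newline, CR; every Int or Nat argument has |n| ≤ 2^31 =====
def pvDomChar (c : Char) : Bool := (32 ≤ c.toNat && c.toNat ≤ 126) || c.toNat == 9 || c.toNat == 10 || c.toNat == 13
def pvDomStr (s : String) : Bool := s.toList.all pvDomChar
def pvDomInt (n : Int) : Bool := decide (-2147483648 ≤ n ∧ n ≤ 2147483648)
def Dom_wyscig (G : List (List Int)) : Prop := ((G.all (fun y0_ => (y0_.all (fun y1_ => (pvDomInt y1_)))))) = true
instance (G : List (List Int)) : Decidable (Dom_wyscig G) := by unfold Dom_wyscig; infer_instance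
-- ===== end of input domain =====

-- B replaces A's recursive DFS by a single explicit-stack postorder machine shared by both
-- Kosaraju passes, and short-circuits on the first singleton component instead of collecting
-- all components and scanning them afterwards (objective: alternative decomposition, same cost).

-- shared Python-semantics helpers (visited[v], visited[v] = True, G[s]); exact for -len ≤ v < len
def cf (vis : List Bool) : Nat := vis.count false
def visTrue (vis : List Bool) (v : Int) : Bool := (PySem.List.pyGet? vis v).getD true
def markT (vis : List Bool) (v : Int) : List Bool := PySem.List.pySetD vis v true
def adjOf (G : List (List Int)) (s : Int) : List Int := PySem.List.pyGetD G s []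

theorem count_false_set_true (l : List Bool) (k : Nat) (h : l[k]? = some false) :
    (l.set k true).count false < l.count false := by
  induction l generalizing k with
  | nil => simp at h
  | cons b t ih =>
    cases k with
    | zero =>
      simp at h
      subst h
      simp
    | succ k =>
      simp at h
      have := ih k h
      simp [List.count_cons]
      omega

-- needed by the ports' termination arguments
theorem cf_markT_lt (vis : List Bool) (v : Int) (h : visTrue vis v = false) :
    cf (markT vis v) < cf vis := by
  unfold visTrue at h
  unfold markT cf PySem.List.pySetD PySem.List.pySet?
  unfold PySem.List.pyGet? at h
  cases e : PySem.List.pyIdx? vis.length v with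
  | none => rw [e] at h; simp at h
  | some k =>
    rw [e] at h
    simp at h ⊢
    cases e2 : vis[k]? with
    | none => rw [e2] at h; simp at h
    | some b =>
      rw [e2] at h
      simp at h
      subst h
      exact count_false_set_true vis k e2

-- ===== PORT A =====
-- DFSVisit(G,s,visited,order): marks s, recurses on unvisited neighbours, appends s.
-- The result carries the invariant cf ≤ cf vis only to justify termination.
mutual
  def dfsA (G : List (List Int)) (s : Int) (vis : List Bool) (ord : List Int) :
      {p : List Bool × List Int // cf p.1 ≤ cf vis} :=
    if h : visTrue vis s = false then
      let q := goA G (adjOf G s) (markT vis s) ord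
      ⟨(q.1.1, q.1.2 ++ [s]),
        show cf q.1.1 ≤ cf vis by
          have h1 := q.2; have h2 := cf_markT_lt vis s h; omega⟩
    else ⟨(vis, ord), le_refl _⟩
  termination_by (cf vis, 0)
  decreasing_by
    exact Prod.Lex.left _ _ (cf_markT_lt vis s h)

  def goA (G : List (List Int)) (ns : List Int) (vis : List Bool) (ord : List Int) :
      {p : List Bool × List Int // cf p.1 ≤ cf vis} :=
    match ns with
    | [] => ⟨(vis, ord), le_refl _⟩
    | v :: tl =>
      if h : visTrue vis v = false then
        let q := dfsA G v vis ord
        let w := goA G tl q.1.1 q.1.2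
        ⟨w.1, le_trans w.2 q.2⟩
      else goA G tl vis ord
  termination_by (cf vis, ns.length + 1)
  decreasing_by
    · exact Prod.Lex.right _ (by simp)
    · rcases lt_or_eq_of_le q.2 with hl | he
      · exact Prod.Lex.left _ _ hl
      · rw [he]; exact Prod.Lex.right _ (by simp)
    · exact Prod.Lex.right _ (by simp)
end

-- Flip_Edge(G): G_C[v].append(i)
def gcAppend (GC : List (List Int)) (v : Int) (x : Int) : List (List Int) :=
  PySem.List.pySetD GC v (PySem.List.pyGetD GC v [] ++ [x])

def flipA (G : List (List Int)) : List (List Int) :=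
  (List.range G.length).foldl
    (fun GC i => (adjOf G (i : Int)).foldl (fun GC v => gcAppend GC v (i : Int)) GC)
    (List.replicate G.length [])

def wyscig (G : List (List Int)) : Bool :=
  let n := G.length
  let s1 := (List.range n).foldl
      (fun (st : List Bool × List Int) i =>
        if visTrue st.1 (i : Int) = false then (dfsA G (i : Int) st.1 st.2).1 else st)
      (List.replicate n false, [])
  let G2 := flipA G
  let s2 := s1.2.reverse.foldl
      (fun (st : List Bool × List (List Int)) i =>
        if visTrue st.1 i = false then
          ((dfsA G2 i st.1 []).1.1, st.2 ++ [(dfsA G2 i st.1 []).1.2])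
        else st)
      (List.replicate n false, [])
  !(s2.2.any (fun c => c.length == 1))

-- ===== PORT B =====
-- _postorder: explicit stack of (node, remaining neighbours) frames
def sizeF (frames : List (Int × List Int)) : Nat :=
  frames.foldr (fun f a => f.2.length + 1 + a) 0

theorem sizeF_cons (s : Int) (ns : List Int) (rest : List (Int × List Int)) :
    sizeF ((s, ns) :: rest) = ns.length + 1 + sizeF rest := rfl

def runM (G : List (List Int)) (frames : List (Int × List Int)) (vis : List Bool)
    (ord : List Int) : List Bool × List Int :=
  match frames with
  | [] => (vis, ord)
  | (s, ns) :: rest =>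
    match ns with
    | [] => runM G rest vis (ord ++ [s])
    | v :: tl =>
      if h : visTrue vis v = false then
        runM G ((v, adjOf G v) :: (s, tl) :: rest) (markT vis v) ord
      else runM G ((s, tl) :: rest) vis ord
termination_by (cf vis, sizeF frames)
decreasing_by
  all_goals
    first
      | exact Prod.Lex.left _ _ (cf_markT_lt vis v h)
      | exact Prod.Lex.right _
          (by simp only [sizeF_cons, List.length_cons, List.length_nil]; omega)

def postB (G : List (List Int)) (r : Int) (vis : List Bool) (ord : List Int) :
    List Bool × List Int :=
  runM G [(r, adjOf G r)] (markT vis r) ord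

def flipB (G : List (List Int)) : List (List Int) :=
  (List.range G.length).foldl
    (fun GC i => (adjOf G (i : Int)).foldl (fun GC v => gcAppend GC v (i : Int)) GC)
    (List.replicate G.length [])

-- for r in reversed(order): … early return False on a singleton component
def phase2B (G2 : List (List Int)) : List Int → List Bool → Bool
  | [], _ => true
  | r :: rest, vis =>
    if visTrue vis r = false then
      let p := postB G2 r vis []
      if p.2.length == 1 then false else phase2B G2 rest p.1
    else phase2B G2 rest vis

def wyscig_alt (G : List (List Int)) : Bool :=
  let n := G.length
  let s1 := (List.range n).foldl
      (fun (st : List Bool × List Int) r =>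
        if visTrue st.1 (r : Int) = false then postB G (r : Int) st.1 st.2 else st)
      (List.replicate n false, [])
  let G2 := flipB G
  phase2B G2 s1.2.reverse (List.replicate n false)

-- ===== PRECONDITION & SPEC =====
-- Pre_: every adjacency entry v is a legal Python index into the n vertex lists
-- (-n ≤ v < n); any other entry makes A raise IndexError. This is exactly A's no-raise domain.
def Pre_wyscig (G : List (List Int)) : Prop :=
  ∀ row ∈ G, ∀ v ∈ row, -(G.length : Int) ≤ v ∧ v < (G.length : Int)
instance (G : List (List Int)) : Decidable (Pre_wyscig G) := by unfold Pre_wyscig; infer_instance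

def pvWitness_wyscig : List (List Int) := [[1], [0]]

def Spec_wyscig (G : List (List Int)) (out : Bool) : Prop := out = wyscig_alt G
instance (G : List (List Int)) (out : Bool) : Decidable (Spec_wyscig G out) := by
  unfold Spec_wyscig; infer_instance

-- ===== CLAIM (what is proved, stated in full; the proofs are below) =====
def Claim_equal_wyscig : Prop :=
  ∀ (G : List (List Int)), Dom_wyscig G → Pre_wyscig G → Spec_wyscig G (wyscig G)

-- ===== LEMMAS AND PROOFS =====

-- unfolding lemmas for the well-founded definitions (value level)
theorem runM_base (G : List (List Int)) (vis : List Bool) (ord : List Int) :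
    runM G [] vis ord = (vis, ord) := by rw [runM]

theorem runM_pop (G : List (List Int)) (s : Int) (rest : List (Int × List Int))
    (vis : List Bool) (ord : List Int) :
    runM G ((s, []) :: rest) vis ord = runM G rest vis (ord ++ [s]) := by rw [runM]

theorem runM_step_pos (G : List (List Int)) (s v : Int) (tl : List Int)
    (rest : List (Int × List Int)) (vis : List Bool) (ord : List Int)
    (h : visTrue vis v = false) :
    runM G ((s, v :: tl) :: rest) vis ord =
      runM G ((v, adjOf G v) :: (s, tl) :: rest) (markT vis v) ord := by
  rw [runM]; simp [h]

theorem runM_step_neg (G : List (List Int)) (s v : Int) (tl : List Int)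
    (rest : List (Int × List Int)) (vis : List Bool) (ord : List Int)
    (h : ¬ visTrue vis v = false) :
    runM G ((s, v :: tl) :: rest) vis ord = runM G ((s, tl) :: rest) vis ord := by
  rw [runM]; simp [h]

theorem goA_nil_val (G : List (List Int)) (vis : List Bool) (ord : List Int) :
    (goA G [] vis ord).1 = (vis, ord) := by rw [goA]

theorem goA_cons_pos_val (G : List (List Int)) (v : Int) (tl : List Int)
    (vis : List Bool) (ord : List Int) (h : visTrue vis v = false) :
    (goA G (v :: tl) vis ord).1 =
      (goA G tl (dfsA G v vis ord).1.1 (dfsA G v vis ord).1.2).1 := by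
  rw [goA]; simp [h]

theorem goA_cons_neg_val (G : List (List Int)) (v : Int) (tl : List Int)
    (vis : List Bool) (ord : List Int) (h : ¬ visTrue vis v = false) :
    (goA G (v :: tl) vis ord).1 = (goA G tl vis ord).1 := by
  rw [goA]; simp [h]

theorem dfsA_pos_val (G : List (List Int)) (s : Int) (vis : List Bool) (ord : List Int)
    (h : visTrue vis s = false) :
    (dfsA G s vis ord).1 =
      ((goA G (adjOf G s) (markT vis s) ord).1.1,
        (goA G (adjOf G s) (markT vis s) ord).1.2 ++ [s]) := by
  rw [dfsA]; simp [h]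

-- The simulation lemma: one frame of the stack machine computes exactly the neighbour
-- loop of the recursive DFS, then appends its node and continues with the rest.
theorem runM_bridge (G : List (List Int)) :
    ∀ (c : Nat) (vis : List Bool), cf vis ≤ c →
    ∀ (ns : List Int) (s : Int) (rest : List (Int × List Int)) (ord : List Int),
      runM G ((s, ns) :: rest) vis ord =
        runM G rest (goA G ns vis ord).1.1 ((goA G ns vis ord).1.2 ++ [s]) := by
  intro c
  induction c with
  | zero =>
    intro vis hvis ns
    induction ns with
    | nil =>
      intro s rest ord
      rw [runM_pop, goA_nil_val]
    | cons v tl ih =>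
      intro s rest ord
      by_cases h : visTrue vis v = false
      · exact absurd (cf_markT_lt vis v h) (by omega)
      · rw [runM_step_neg G s v tl rest vis ord h, goA_cons_neg_val G v tl vis ord h,
          ih s rest ord]
  | succ c ihc =>
    intro vis hvis ns
    induction ns with
    | nil =>
      intro s rest ord
      rw [runM_pop, goA_nil_val]
    | cons v tl ih =>
      intro s rest ord
      by_cases h : visTrue vis v = false
      · have h1 : cf (markT vis v) ≤ c := by have := cf_markT_lt vis v h; omega
        rw [runM_step_pos G s v tl rest vis ord h]
        rw [ihc (markT vis v) h1 (adjOf G v) v ((s, tl) :: rest) ord]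
        rw [ihc (goA G (adjOf G v) (markT vis v) ord).1.1
              (le_trans (goA G (adjOf G v) (markT vis v) ord).2 h1) tl s rest
              ((goA G (adjOf G v) (markT vis v) ord).1.2 ++ [v])]
        rw [goA_cons_pos_val G v tl vis ord h, dfsA_pos_val G v vis ord h]
      · rw [runM_step_neg G s v tl rest vis ord h, goA_cons_neg_val G v tl vis ord h,
          ih s rest ord]

theorem postB_eq (G : List (List Int)) (r : Int) (vis : List Bool) (ord : List Int)
    (h : visTrue vis r = false) : postB G r vis ord = (dfsA G r vis ord).1 := by
  unfold postB
  rw [runM_bridge G (cf (markT vis r)) (markT vis r) le_rfl (adjOf G r) r [] ord]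
  rw [runM_base, dfsA_pos_val G r vis ord h]

-- the second pass of A only ever appends to its accumulator of components
theorem foldl2_frame (G2 : List (List Int)) :
    ∀ (L : List Int) (vis : List Bool) (acc : List (List Int)),
      ∃ D, (L.foldl
          (fun (st : List Bool × List (List Int)) i =>
            if visTrue st.1 i = false then
              ((dfsA G2 i st.1 []).1.1, st.2 ++ [(dfsA G2 i st.1 []).1.2])
            else st) (vis, acc)).2 = acc ++ D := by
  intro L
  induction L with
  | nil => intro vis acc; exact ⟨[], by simp⟩
  | cons r rest ih =>
    intro vis acc
    by_cases h : visTrue vis r = false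
    · obtain ⟨D, hD⟩ := ih (dfsA G2 r vis []).1.1 (acc ++ [(dfsA G2 r vis []).1.2])
      exact ⟨[(dfsA G2 r vis []).1.2] ++ D, by simp [h, hD]⟩
    · obtain ⟨D, hD⟩ := ih vis acc
      exact ⟨D, by simp [h, hD]⟩

-- B's early-exit loop returns exactly the "no singleton component" of A's collect-then-scan
theorem phase2_eq (G2 : List (List Int)) :
    ∀ (L : List Int) (vis : List Bool) (acc : List (List Int)),
      acc.any (fun c => c.length == 1) = false →
      phase2B G2 L vis =
        !((L.foldl
            (fun (st : List Bool × List (List Int)) i =>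
              if visTrue st.1 i = false then
                ((dfsA G2 i st.1 []).1.1, st.2 ++ [(dfsA G2 i st.1 []).1.2])
              else st) (vis, acc)).2.any (fun c => c.length == 1)) := by
  intro L
  induction L with
  | nil => intro vis acc hacc; simp [phase2B, hacc]
  | cons r rest ih =>
    intro vis acc hacc
    by_cases h : visTrue vis r = false
    · rw [phase2B]
      rw [if_pos h, postB_eq G2 r vis [] h]
      by_cases hlen : ((dfsA G2 r vis []).1.2.length == 1) = true
      · simp only [hlen, if_true]
        obtain ⟨D, hD⟩ := foldl2_frame G2 rest (dfsA G2 r vis []).1.1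
          (acc ++ [(dfsA G2 r vis []).1.2])
        simp only [List.foldl_cons, if_pos h, hD]
        simp [hlen]
      · simp only [hlen, Bool.false_eq_true, if_false]
        simp only [List.foldl_cons, if_pos h]
        rw [ih (dfsA G2 r vis []).1.1 (acc ++ [(dfsA G2 r vis []).1.2])
          (by simp [hacc]; simpa using hlen)]
    · rw [phase2B]
      rw [if_neg h]
      simp only [List.foldl_cons, if_neg h]
      exact ih vis acc hacc

theorem flip_eq (G : List (List Int)) : flipB G = flipA G := rfl

theorem wyscig_eq (G : List (List Int)) : wyscig G = wyscig_alt G := by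
  simp only [wyscig, wyscig_alt]
  rw [flip_eq]
  have hstep :
      (List.range G.length).foldl
        (fun (st : List Bool × List Int) r =>
          if visTrue st.1 (r : Int) = false then postB G (r : Int) st.1 st.2 else st)
        (List.replicate G.length false, []) =
      (List.range G.length).foldl
        (fun (st : List Bool × List Int) i =>
          if visTrue st.1 (i : Int) = false then (dfsA G (i : Int) st.1 st.2).1 else st)
        (List.replicate G.length false, []) := by
    apply List.foldl_ext
    intro st i _
    by_cases h : visTrue st.1 (i : Int) = false
    · rw [if_pos h, if_pos h, postB_eq G (i : Int) st.1 st.2 h]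
    · rw [if_neg h, if_neg h]
  rw [hstep]
  rw [phase2_eq (flipA G) _ (List.replicate G.length false) [] (by simp)]

-- ===== VERDICT (by name: the statement is the Claim_ definition above) =====
theorem wyscig_spec : Claim_equal_wyscig := by
  intro G _ _
  unfold Spec_wyscig
  exact wyscig_eq G
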